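-- pv_equiv track=rewrite | github.com/Algorithm-Artist-ctrl/Trees | greatest_product.py | greatest_product_equal_to_element
-- ===== SOURCE A (Python) =====
-- def greatest_product_equal_to_element(arr):
--     s = set(arr)
--     freq = {}
--     for x in arr:
--         freq[x] = freq.get(x, 0) + 1
--     arr_sorted = sorted(arr, reverse=True)
--     for target in arr_sorted:
--         for a in s:
--             if a == 0:
--                 if target == 0 and freq.get(0, 0) > 1:
--                     return 0
--                 continue
--             if target % a == 0:
--                 b = target // a
--                 if b in s:
--                     if a != b or freq[a] > 1:
--                         if a * b == target:
--                             return target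
--     return -1
-- ===== SOURCE B (Python) =====
-- def greatest_product_equal_to_element(arr):
--     freq = {}
--     for x in arr:
--         freq[x] = freq.get(x, 0) + 1
--     prods = {a * b for a in freq for b in freq if a != b or freq[a] > 1}
--     best = None
--     for t in arr:
--         if t in prods and (best is None or t > best):
--             best = t
--     return -1 if best is None else best
-- ===== Notes on version B (the rewrite author's own statement) =====
-- stated objective: alternative
-- what changed: Replaces A's sort plus per-target trial-division scan over the element set by precomputing the set of all achievable products once (preserving the a!=b-or-freq[a]>1 eligibility rule) and returning the maximum element of arr found in that set via a single running-max pass, with no sorting and no division.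
import Mathlib
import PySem

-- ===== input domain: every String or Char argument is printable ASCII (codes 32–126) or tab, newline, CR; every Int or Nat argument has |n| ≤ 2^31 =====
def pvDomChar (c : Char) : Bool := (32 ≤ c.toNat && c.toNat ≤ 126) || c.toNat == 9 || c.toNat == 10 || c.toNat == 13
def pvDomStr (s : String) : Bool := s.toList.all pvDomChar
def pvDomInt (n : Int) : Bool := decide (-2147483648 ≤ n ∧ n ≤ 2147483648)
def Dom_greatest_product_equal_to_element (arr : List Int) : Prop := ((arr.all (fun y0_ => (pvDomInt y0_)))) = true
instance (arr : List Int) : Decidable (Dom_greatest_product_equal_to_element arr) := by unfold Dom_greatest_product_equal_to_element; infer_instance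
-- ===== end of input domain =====

-- B replaces A's per-target division scan over the set by a precomputed set of all
-- achievable products plus a single running-max pass over arr (alternative decomposition).


-- ===== PORT A =====
-- 'freq = {}; for x in arr: freq[x] = freq.get(x, 0) + 1'  (identical line in A and B)
def mkFreq (arr : List Int) : PySem.Dict Int Int :=
  arr.foldl (fun d x => d.insert x (d.getD x 0 + 1)) PySem.Dict.empty

-- inner 'for a in s' loop; `sAll` is the full set s (for the 'b in s' test), the last
-- argument the elements still to scan.  freq[a] is ported as getD (a is always a key of
-- freq since a ∈ set(arr)).  The loop's result does not depend on the set's iteration order.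
def gpInnerA (sAll : List Int) (freq : PySem.Dict Int Int) (target : Int) : List Int → Option Int
  | [] => none
  | a :: l =>
    if a = 0 then
      if target = 0 ∧ 1 < freq.getD 0 0 then some 0
      else gpInnerA sAll freq target l
    else
      if PySem.Int.mod target a = 0 then
        let b := PySem.Int.floordiv target a
        if b ∈ sAll then
          if a ≠ b ∨ 1 < freq.getD a 0 then
            if a * b = target then some target
            else gpInnerA sAll freq target l
          else gpInnerA sAll freq target l
        else gpInnerA sAll freq target l
      else gpInnerA sAll freq target l

-- outer 'for target in arr_sorted' loop
def gpOuterA (sAll : List Int) (freq : PySem.Dict Int Int) : List Int → Int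
  | [] => -1
  | t :: rest =>
    match gpInnerA sAll freq t sAll with
    | some v => v
    | none => gpOuterA sAll freq rest

def greatest_product_equal_to_element (arr : List Int) : Int :=
  let s : PySem.Set Int := PySem.Set.ofList arr
  let freq := mkFreq arr
  let arr_sorted := PySem.List.sorted arr (fun x => x) true
  gpOuterA s freq arr_sorted

-- ===== PORT B =====
-- the set comprehension '{a*b for a in freq for b in freq if a != b or freq[a] > 1}'
def mkProds (ks : List Int) (freq : PySem.Dict Int Int) : PySem.Set Int :=
  PySem.Set.ofList (ks.flatMap fun a =>
    ks.filterMap fun b => if a ≠ b ∨ 1 < freq.getD a 0 then some (a * b) else none)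

-- the running-best loop 'for t in arr: if t in prods and (best is None or t > best): best = t'
def bestLoop (prods : PySem.Set Int) (arr : List Int) : Option Int :=
  arr.foldl (fun best t =>
    if PySem.Set.contains prods t then
      match best with
      | none => some t
      | some m => if m < t then some t else best
    else best) none

def greatest_product_equal_to_element_alt (arr : List Int) : Int :=
  let freq := mkFreq arr
  let ks := freq.keys
  let prods := mkProds ks freq
  let best := bestLoop prods arr
  match best with
  | none => -1
  | some m => m

-- ===== PRECONDITION & SPEC =====
def Spec_greatest_product_equal_to_element (arr : List Int) (out : Int) : Prop := out = greatest_product_equal_to_element_alt arr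
instance (arr : List Int) (out : Int) : Decidable (Spec_greatest_product_equal_to_element arr out) := by unfold Spec_greatest_product_equal_to_element; infer_instance

-- ===== CLAIM (what is proved, stated in full; the proofs are below) =====
def Claim_equal_greatest_product_equal_to_element : Prop := ∀ (arr : List Int), Dom_greatest_product_equal_to_element arr → Spec_greatest_product_equal_to_element arr (greatest_product_equal_to_element arr)

-- ===== LEMMAS AND PROOFS =====

-- the condition on which A's inner loop fires at element a
def HitA (sAll : List Int) (freq : PySem.Dict Int Int) (target a : Int) : Prop :=
  if a = 0 then target = 0 ∧ 1 < freq.getD 0 0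
  else PySem.Int.mod target a = 0 ∧ PySem.Int.floordiv target a ∈ sAll ∧
       (a ≠ PySem.Int.floordiv target a ∨ 1 < freq.getD a 0) ∧
       a * PySem.Int.floordiv target a = target

lemma gpInnerA_cons_hit (sAll : List Int) (freq : PySem.Dict Int Int) (target a : Int)
    (l : List Int) (h : HitA sAll freq target a) :
    gpInnerA sAll freq target (a :: l) = some target := by
  by_cases ha : a = 0
  · subst ha
    unfold HitA at h
    rw [if_pos rfl] at h
    simp [gpInnerA, h.2, h.1]
  · unfold HitA at h
    rw [if_neg ha] at h
    obtain ⟨h1, h2, h3, h4⟩ := h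
    simp only [gpInnerA, if_neg ha]
    rw [if_pos h1, if_pos h2, if_pos h3, if_pos h4]

lemma gpInnerA_cons_not (sAll : List Int) (freq : PySem.Dict Int Int) (target a : Int)
    (l : List Int) (h : ¬ HitA sAll freq target a) :
    gpInnerA sAll freq target (a :: l) = gpInnerA sAll freq target l := by
  by_cases ha : a = 0
  · subst ha
    unfold HitA at h
    rw [if_pos rfl] at h
    simp [gpInnerA, h]
  · unfold HitA at h
    rw [if_neg ha] at h
    simp only [gpInnerA, if_neg ha]
    split_ifs <;> first | rfl | tauto

lemma gpInnerA_some (sAll : List Int) (freq : PySem.Dict Int Int) (target : Int)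
    (l : List Int) (h : ∃ a ∈ l, HitA sAll freq target a) :
    gpInnerA sAll freq target l = some target := by
  induction l with
  | nil => exact absurd h (by simp)
  | cons a l ih =>
    by_cases ha : HitA sAll freq target a
    · exact gpInnerA_cons_hit sAll freq target a l ha
    · rw [gpInnerA_cons_not sAll freq target a l ha]
      apply ih
      obtain ⟨x, hx, hh⟩ := h
      rcases List.mem_cons.mp hx with rfl | hx'
      · exact absurd hh ha
      · exact ⟨x, hx', hh⟩

lemma gpInnerA_none (sAll : List Int) (freq : PySem.Dict Int Int) (target : Int)
    (l : List Int) (h : ∀ a ∈ l, ¬ HitA sAll freq target a) :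
    gpInnerA sAll freq target l = none := by
  induction l with
  | nil => rfl
  | cons a l ih =>
    rw [gpInnerA_cons_not sAll freq target a l (h a List.mem_cons_self)]
    exact ih (fun x hx => h x (List.mem_cons_of_mem _ hx))

-- the symmetric product predicate both programs decide (Prop and Bool forms)
def GoodP (s : List Int) (freq : PySem.Dict Int Int) (t : Int) : Prop :=
  ∃ a ∈ s, ∃ b ∈ s, a * b = t ∧ (a ≠ b ∨ 1 < freq.getD a 0)

def GoodB (s : List Int) (freq : PySem.Dict Int Int) (t : Int) : Bool :=
  decide (∃ a ∈ s, ∃ b ∈ s, a * b = t ∧ (a ≠ b ∨ 1 < freq.getD a 0))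

lemma goodB_iff (s : List Int) (freq : PySem.Dict Int Int) (t : Int) :
    GoodB s freq t = true ↔ GoodP s freq t := by
  rw [GoodB, decide_eq_true_eq]
  exact Iff.rfl

lemma hit_iff_good (s : List Int) (freq : PySem.Dict Int Int) (t : Int) :
    (∃ a ∈ s, HitA s freq t a) ↔ GoodP s freq t := by
  constructor
  · rintro ⟨a, ha, hhit⟩
    by_cases h0 : a = 0
    · subst h0
      unfold HitA at hhit
      rw [if_pos rfl] at hhit
      exact ⟨0, ha, 0, ha, by simp [hhit.1], Or.inr hhit.2⟩
    · simp only [HitA, if_neg h0] at hhit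
      exact ⟨a, ha, PySem.Int.floordiv t a, hhit.2.1, hhit.2.2.2, hhit.2.2.1⟩
  · rintro ⟨a, ha, b, hb, hab, hcond⟩
    by_cases h0 : a = 0
    · subst h0
      have ht : t = 0 := by omega
      subst ht
      by_cases hb0 : b = 0
      · subst hb0
        refine ⟨0, ha, ?_⟩
        have h1 : 1 < freq.getD 0 0 := by
          rcases hcond with h | h
          · exact absurd rfl h
          · exact h
        simp [HitA, h1]
      · refine ⟨b, hb, ?_⟩
        have hm : PySem.Int.mod 0 b = 0 := (PySem.Int.mod_eq_zero_iff_dvd 0 b).mpr (dvd_zero b)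
        have hd : PySem.Int.floordiv 0 b = 0 := by
          have hfm := PySem.Int.floordiv_mul_add_mod 0 b
          rw [hm] at hfm
          have hb' : PySem.Int.floordiv 0 b * b = 0 := by omega
          rcases mul_eq_zero.mp hb' with h | h
          · exact h
          · exact absurd h hb0
        simp [HitA, hb0, hm, hd, ha]
    · refine ⟨a, ha, ?_⟩
      have hdvd : a ∣ t := ⟨b, hab.symm⟩
      have hm : PySem.Int.mod t a = 0 := (PySem.Int.mod_eq_zero_iff_dvd t a).mpr hdvd
      have hd : PySem.Int.floordiv t a = b := by
        have hfm := PySem.Int.floordiv_mul_add_mod t a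
        rw [hm] at hfm
        have h2 : a * PySem.Int.floordiv t a = a * b := by
          rw [mul_comm a (PySem.Int.floordiv t a)]
          omega
        exact mul_left_cancel₀ h0 h2
      rw [HitA, if_neg h0, hd]
      exact ⟨hm, hb, hcond, hab⟩

-- B's product set holds exactly the GoodP targets
lemma mem_prods_iff (ks : List Int) (freq : PySem.Dict Int Int) (t : Int) :
    t ∈ mkProds ks freq ↔ GoodP ks freq t := by
  rw [mkProds, PySem.Set.mem_ofList, List.mem_flatMap]
  constructor
  · rintro ⟨a, ha, hmem⟩
    rcases List.mem_filterMap.mp hmem with ⟨b, hb, hsome⟩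
    by_cases hc : a ≠ b ∨ 1 < freq.getD a 0
    · rw [if_pos hc] at hsome
      have hab : a * b = t := Option.some.inj hsome
      exact ⟨a, ha, b, hb, hab, hc⟩
    · rw [if_neg hc] at hsome
      exact absurd hsome (by simp)
  · rintro ⟨a, ha, b, hb, hab, hcond⟩
    refine ⟨a, ha, List.mem_filterMap.mpr ⟨b, hb, ?_⟩⟩
    rw [if_pos hcond, hab]

-- outer loop of A is "first target satisfying GoodP, else -1"
lemma gpOuterA_eq (s : List Int) (freq : PySem.Dict Int Int) (l : List Int) :
    gpOuterA s freq l =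
      match l.find? (fun t => GoodB s freq t) with
      | some t => t
      | none => -1 := by
  induction l with
  | nil => simp [gpOuterA]
  | cons t l ih =>
    simp only [gpOuterA]
    by_cases h : GoodP s freq t
    · rw [gpInnerA_some s freq t s ((hit_iff_good s freq t).mpr h)]
      rw [List.find?_cons_of_pos ((goodB_iff s freq t).mpr h)]
    · have hnone : ∀ a ∈ s, ¬ HitA s freq t a := by
        intro a ha hh
        exact h ((hit_iff_good s freq t).mp ⟨a, ha, hh⟩)
      rw [gpInnerA_none s freq t s hnone]
      rw [List.find?_cons_of_neg (by simp [goodB_iff, h])]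
      exact ih

-- option-valued max, the value B's running best computes
def omax : Option Int → Option Int → Option Int
  | none, y => y
  | some a, none => some a
  | some a, some b => some (max a b)

lemma omax_none_right (x : Option Int) : omax x none = x := by
  cases x <;> rfl

lemma omax_assoc (x y z : Option Int) : omax (omax x y) z = omax x (omax y z) := by
  cases x <;> cases y <;> cases z <;> simp [omax, max_assoc]

lemma foldl_max_init (l : List Int) : ∀ a b : Int,
    List.foldl max (max a b) l = max a (List.foldl max b l) := by
  induction l with
  | nil => intro a b; rfl
  | cons c l ih =>
    intro a b
    rw [List.foldl_cons, List.foldl_cons, max_assoc, ih a (max b c)]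

lemma max?_cons_omax (t : Int) (l : List Int) : (t :: l).max? = omax (some t) l.max? := by
  cases h : l.max? with
  | none =>
    rw [List.max?_eq_none_iff] at h
    subst h
    rfl
  | some m =>
    rcases l with _ | ⟨x, l'⟩
    · simp at h
    · rw [List.max?_cons'] at h ⊢
      injection h with h
      simp only [omax, List.foldl_cons, ← h]
      rw [foldl_max_init]

-- B's fold computes omax of the accumulator and the max filtered element
lemma foldB_eq (P : Int → Bool) (l : List Int) :
    ∀ acc : Option Int,
      l.foldl (fun best t =>
        if P t then
          match best with
          | none => some t
          | some m => if m < t then some t else best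
        else best) acc = omax acc (l.filter P).max? := by
  induction l with
  | nil => intro acc; simp [omax_none_right]
  | cons t l ih =>
    intro acc
    rw [List.foldl_cons]
    by_cases h : P t
    · have hstep : (if P t then
          match acc with
          | none => some t
          | some m => if m < t then some t else acc
        else acc) = omax acc (some t) := by
        cases acc with
        | none => simp [h, omax]
        | some m =>
          simp only [if_pos h, omax]
          by_cases hlt : m < t
          · rw [if_pos hlt, max_eq_right (le_of_lt hlt)]
          · rw [if_neg hlt, max_eq_left (by omega)]
      rw [hstep, ih, List.filter_cons_of_pos h, max?_cons_omax, omax_assoc]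
    · rw [if_neg h, ih, List.filter_cons_of_neg h]

lemma bestLoop_eq (prods : PySem.Set Int) (arr : List Int) :
    bestLoop prods arr = (arr.filter (fun t => PySem.Set.contains prods t)).max? := by
  rw [bestLoop, foldB_eq (fun t => PySem.Set.contains prods t) arr none]
  cases (arr.filter (fun t => PySem.Set.contains prods t)).max? <;> rfl

-- first P-element of a descending permutation of arr = max P-element of arr
lemma find_desc_eq_max (arr l : List Int) (P : Int → Bool)
    (hperm : l.Perm arr) (hdesc : l.Pairwise (fun a b => b ≤ a)) :
    (match l.find? P with | some t => t | none => (-1 : Int)) =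
    (match (arr.filter P).max? with | none => (-1 : Int) | some m => m) := by
  cases hmax : (arr.filter P).max? with
  | none =>
    rw [List.max?_eq_none_iff] at hmax
    have hnone : l.find? P = none := by
      rw [List.find?_eq_none]
      intro x hx hP
      have hmem : x ∈ arr.filter P := List.mem_filter.mpr ⟨hperm.mem_iff.mp hx, hP⟩
      rw [hmax] at hmem
      exact absurd hmem List.not_mem_nil
    rw [hnone]
  | some m =>
    rw [List.max?_eq_some_iff] at hmax
    obtain ⟨hm_mem, hm_max⟩ := hmax
    have hmP : P m := (List.mem_filter.mp hm_mem).2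
    have hm_arr : m ∈ arr := (List.mem_filter.mp hm_mem).1
    have hm_l : m ∈ l := hperm.mem_iff.mpr hm_arr
    cases hfind : l.find? P with
    | none =>
      rw [List.find?_eq_none] at hfind
      exact absurd hmP (by simpa using hfind m hm_l)
    | some t =>
      have htP : P t := List.find?_some hfind
      have ht_l : t ∈ l := List.mem_of_find?_eq_some hfind
      have ht_le : t ≤ m :=
        hm_max t (List.mem_filter.mpr ⟨hperm.mem_iff.mp ht_l, htP⟩)
      have hm_le : m ≤ t := by
        rcases List.find?_eq_some_iff_append.mp hfind with ⟨hPt, pre, suf, hsplit, hpre⟩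
        rw [hsplit] at hm_l
        rcases List.mem_append.mp hm_l with hin | hin
        · exact absurd hmP (by simpa using hpre m hin)
        · rcases List.mem_cons.mp hin with rfl | hin'
          · exact le_refl _
          · rw [hsplit] at hdesc
            have := (List.pairwise_append.mp hdesc).2.1
            exact (List.pairwise_cons.mp this).1 m hin'
      simp [le_antisymm ht_le hm_le]

-- ===== VERDICT (by name: the statement is the Claim_ definition above) =====
theorem greatest_product_equal_to_element_spec : Claim_equal_greatest_product_equal_to_element := by
  intro arr _
  unfold Spec_greatest_product_equal_to_element
  have hA : greatest_product_equal_to_element arr =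
      gpOuterA (PySem.Set.ofList arr) (mkFreq arr) (PySem.List.sorted arr (fun x => x) true) := rfl
  have hB : greatest_product_equal_to_element_alt arr =
      (match bestLoop (mkProds (mkFreq arr).keys (mkFreq arr)) arr with
       | none => -1
       | some m => m) := rfl
  rw [hA, hB]
  have hfreq : mkFreq arr = PySem.Dict.counter arr :=
    PySem.Dict.foldl_insert_getD_add_one_eq_counter arr
  rw [hfreq, PySem.Dict.keys_counter]
  rw [gpOuterA_eq, bestLoop_eq]
  have hfun : (fun t => PySem.Set.contains
        (mkProds (PySem.Set.ofList arr) (PySem.Dict.counter arr)) t) =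
      (fun t => GoodB (PySem.Set.ofList arr) (PySem.Dict.counter arr) t) := by
    funext t
    rw [Bool.eq_iff_iff, PySem.Set.contains_iff, goodB_iff]
    exact mem_prods_iff _ _ t
  rw [hfun]
  exact find_desc_eq_max arr (PySem.List.sorted arr (fun x => x) true)
    (fun t => GoodB (PySem.Set.ofList arr) (PySem.Dict.counter arr) t)
    (PySem.List.sorted_perm arr (fun x => x) true)
    (PySem.List.sorted_pairwise_rev arr (fun x => x))
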